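-- pv_equiv track=rewrite | github.com/plexicus/reticulum | src/reticulum/dockerfile_analyzer.py | _combine_source_paths
-- ===== SOURCE A (Python) =====
-- from typing import List, Optional, Dict, Any
--
-- def _combine_source_paths(
--     basic_paths: List[str], context_paths: List[str]
-- ) -> List[str]:
--     """Combine source paths from basic analysis and build context analysis."""
--     combined = set(basic_paths + context_paths)
--
--     # Consolidate paths
--     consolidated = []
--     for path in sorted(combined):
--         # Don't add if a parent directory already exists
--         if not any(path.startswith(existing + "/") for existing in consolidated):
--             # Remove any existing child directories
--             consolidated = [p for p in consolidated if not path.startswith(p + "/")]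
--             consolidated.append(path)
--
--     return sorted(consolidated)
-- ===== SOURCE B (Python) =====
-- def _combine_source_paths(basic_paths, context_paths):
--     """Combine source paths: keep a path iff none of its slash-ancestors is present."""
--     s = set(basic_paths + context_paths)
--     result = []
--     for p in sorted(s):
--         if not any(p[i] == "/" and p[:i] in s for i in range(len(p))):
--             result.append(p)
--     return result
-- ===== Notes on version B (the rewrite author's own statement) =====
-- stated objective: faster
-- what changed: Instead of A's per-path scan of the consolidated list (any over kept paths, an inner list filter, and a final re-sort), B keeps a sorted-set path iff none of its slash-prefix ancestors is in the hash set, in one pass with O(1) lookups and no re-sort.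
import Mathlib
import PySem

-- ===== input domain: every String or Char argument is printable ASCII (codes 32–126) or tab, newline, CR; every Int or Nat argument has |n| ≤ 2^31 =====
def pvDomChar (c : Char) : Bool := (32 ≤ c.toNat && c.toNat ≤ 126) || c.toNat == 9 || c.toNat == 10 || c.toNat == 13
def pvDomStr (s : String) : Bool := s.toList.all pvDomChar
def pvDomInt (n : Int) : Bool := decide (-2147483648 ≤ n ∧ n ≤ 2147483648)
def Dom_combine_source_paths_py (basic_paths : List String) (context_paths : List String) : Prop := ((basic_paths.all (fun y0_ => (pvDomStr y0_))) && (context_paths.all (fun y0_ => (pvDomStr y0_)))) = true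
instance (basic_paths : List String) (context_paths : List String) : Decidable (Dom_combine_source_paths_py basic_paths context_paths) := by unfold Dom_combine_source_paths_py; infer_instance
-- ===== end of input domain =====

-- B replaces A's quadratic scan of the consolidated list (plus inner filter and final re-sort)
-- by a single pass that keeps a path iff none of its slash-prefix ancestors is in the set.


-- ===== PORT A =====
-- path.startswith(existing + "/"); exact: ported on the char-list side (Chars.startswith)
def pvAnc (path existing : String) : Bool :=
  PySem.Chars.startswith path.toList (existing.toList ++ ['/'])

-- the body of A's `for` loop over sorted(combined), acting on `consolidated`
def pvStepA (cons : List String) (path : String) : List String :=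
  if cons.any (fun existing => pvAnc path existing) then cons
  else (cons.filter (fun p => ! pvAnc path p)) ++ [path]

def combine_source_paths_py (basic_paths : List String) (context_paths : List String) : List String :=
  let combined := PySem.Set.ofList (basic_paths ++ context_paths)
  let consolidated := (PySem.List.sorted combined (fun x => x) false).foldl pvStepA []
  PySem.List.sorted consolidated (fun x => x) false

-- ===== PORT B =====
-- any(p[i] == "/" and p[:i] in s for i in range(len(p))); i is always in range, so p[i] is getD
def pvHasAnc (s : PySem.Set String) (p : String) : Bool :=
  (List.range p.toList.length).any (fun i =>
    (p.toList.getD i ' ' == '/') && PySem.Set.contains s (String.ofList (p.toList.take i)))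

def combine_source_paths_py_alt (basic_paths : List String) (context_paths : List String) : List String :=
  let s := PySem.Set.ofList (basic_paths ++ context_paths)
  (PySem.List.sorted s (fun x => x) false).foldl
    (fun result p => if ! pvHasAnc s p then result ++ [p] else result) []

-- ===== PRECONDITION & SPEC =====
def Spec_combine_source_paths_py (basic_paths : List String) (context_paths : List String) (out : List String) : Prop := out = combine_source_paths_py_alt basic_paths context_paths
instance (basic_paths : List String) (context_paths : List String) (out : List String) : Decidable (Spec_combine_source_paths_py basic_paths context_paths out) := by unfold Spec_combine_source_paths_py; infer_instance

-- ===== CLAIM (what is proved, stated in full; the proofs are below) =====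
def Claim_equal_combine_source_paths_py : Prop := ∀ (basic_paths : List String) (context_paths : List String), Dom_combine_source_paths_py basic_paths context_paths → Spec_combine_source_paths_py basic_paths context_paths (combine_source_paths_py basic_paths context_paths)

-- ===== LEMMAS AND PROOFS =====

theorem pvAnc_iff (p a : String) : pvAnc p a = true ↔ (a.toList ++ ['/']) <+: p.toList := by
  simpa [pvAnc] using PySem.Chars.startswith_iff (s := p.toList) (p := a.toList ++ ['/'])

theorem pvAnc_lt {p a : String} (h : pvAnc p a = true) : a < p := by
  obtain ⟨r, hr⟩ := (pvAnc_iff p a).mp h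
  rw [String.lt_iff_toList_lt, ← hr]
  show List.Lex (· < ·) a.toList (a.toList ++ ['/'] ++ r)
  rw [List.append_assoc]
  induction a.toList with
  | nil => exact List.Lex.nil
  | cons x xs ih => exact List.Lex.cons ih

theorem pvAnc_trans {p a b : String} (h1 : pvAnc a b = true) (h2 : pvAnc p a = true) :
    pvAnc p b = true := by
  rw [pvAnc_iff] at h1 h2 ⊢
  exact h1.trans ((List.prefix_append a.toList ['/']).trans h2)

theorem pvAnc_length_lt {p a : String} (h : pvAnc p a = true) :
    a.toList.length < p.toList.length := by
  obtain ⟨r, hr⟩ := (pvAnc_iff p a).mp h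
  have := congrArg List.length hr
  simp only [List.length_append, List.length_singleton] at this
  omega

theorem pvHasAnc_iff (s : PySem.Set String) (p : String) :
    pvHasAnc s p = true ↔ ∃ a ∈ s, pvAnc p a = true := by
  constructor
  · intro h
    simp only [pvHasAnc, List.any_eq_true, List.mem_range, Bool.and_eq_true, beq_iff_eq] at h
    obtain ⟨i, hi, hslash, hmem⟩ := h
    refine ⟨String.ofList (p.toList.take i), (PySem.Set.contains_iff _ _).mp hmem, ?_⟩
    rw [pvAnc_iff, String.toList_ofList]
    have : p.toList.take i ++ ['/'] = p.toList.take (i + 1) := by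
      rw [List.take_add_one]
      rw [List.getD_eq_getElem?_getD] at hslash
      rw [List.getElem?_eq_getElem hi] at hslash ⊢
      simp at hslash
      simp [hslash]
    rw [this]
    exact List.take_prefix _ _
  · rintro ⟨a, ha, hanc⟩
    obtain ⟨r, hr⟩ := (pvAnc_iff p a).mp hanc
    simp only [pvHasAnc, List.any_eq_true, List.mem_range, Bool.and_eq_true, beq_iff_eq]
    refine ⟨a.toList.length, ?_, ?_, ?_⟩
    · have := congrArg List.length hr
      simp only [List.length_append, List.length_singleton] at this
      omega
    · rw [List.getD_eq_getElem?_getD, ← hr]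
      simp
    · have htake : p.toList.take a.toList.length = a.toList := by
        rw [← hr]
        rw [List.append_assoc, List.singleton_append]
        exact List.take_left (l₁ := a.toList) (l₂ := '/' :: r)
      rw [htake, String.ofList_toList]
      exact (PySem.Set.contains_iff _ _).mpr ha

-- the shortest ancestor (within s) of p that lies in s has itself no ancestor in s
theorem pv_exists_min_anc (s : PySem.Set String) (p : String) :
    ∀ (n : ℕ) (a : String), a.toList.length ≤ n → a ∈ s → pvAnc p a = true →
      ∃ b ∈ s, pvAnc p b = true ∧ pvHasAnc s b = false := by
  intro n
  induction n with
  | zero =>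
    intro a hlen ha hanc
    cases hb : pvHasAnc s a with
    | false => exact ⟨a, ha, hanc, hb⟩
    | true =>
      obtain ⟨b, _, hb2⟩ := (pvHasAnc_iff s a).mp hb
      have := pvAnc_length_lt hb2
      omega
  | succ n ih =>
    intro a hlen ha hanc
    cases hb : pvHasAnc s a with
    | false => exact ⟨a, ha, hanc, hb⟩
    | true =>
      obtain ⟨b, hbmem, hb2⟩ := (pvHasAnc_iff s a).mp hb
      have hlt := pvAnc_length_lt hb2
      exact ih b (by omega) hbmem (pvAnc_trans hb2 hanc)

-- loop invariant for A's fold: the accumulator is the processed prefix filtered by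
-- "no slash-ancestor in the whole set s"
theorem pv_loop (s : PySem.Set String) :
    ∀ (rest xs : List String),
      (xs ++ rest).Pairwise (· < ·) →
      (∀ a, a ∈ s ↔ a ∈ xs ++ rest) →
      rest.foldl pvStepA (xs.filter (fun q => ! pvHasAnc s q)) =
        (xs ++ rest).filter (fun q => ! pvHasAnc s q) := by
  intro rest
  induction rest with
  | nil => intro xs _ _; simp
  | cons p rest' ih =>
    intro xs hpw hmem
    have hpw' : (xs ++ [p] ++ rest').Pairwise (· < ·) := by
      simpa [List.append_assoc] using hpw
    have hmem' : ∀ a, a ∈ s ↔ a ∈ xs ++ [p] ++ rest' := by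
      intro a; simpa [List.append_assoc] using hmem a
    have hstep : pvStepA (xs.filter (fun q => ! pvHasAnc s q)) p =
        (xs ++ [p]).filter (fun q => ! pvHasAnc s q) := by
      cases hp : pvHasAnc s p with
      | true =>
        -- some ancestor of p is in s; its shortest one is kept, lies before p, so the `any` fires
        obtain ⟨a, hamem, hanc⟩ := (pvHasAnc_iff s p).mp hp
        obtain ⟨b, hbmem, hbanc, hbkeep⟩ :=
          pv_exists_min_anc s p a.toList.length a le_rfl hamem hanc
        have hblt : b < p := pvAnc_lt hbanc
        have hbxs : b ∈ xs := by
          rcases List.mem_append.mp ((hmem b).mp hbmem) with h | h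
          · exact h
          · rcases List.mem_cons.mp h with h | h
            · exact absurd (h ▸ hblt) (lt_irrefl p)
            · have : p < b := by
                have hsub : (p :: rest').Pairwise (· < ·) :=
                  hpw.sublist (List.sublist_append_right xs (p :: rest'))
                exact (List.pairwise_cons.mp hsub).1 b h
              exact absurd hblt (asymm this)
        have hany : (xs.filter (fun q => ! pvHasAnc s q)).any (fun e => pvAnc p e) = true := by
          simp only [List.any_eq_true, List.mem_filter]
          exact ⟨b, ⟨hbxs, by simp [hbkeep]⟩, hbanc⟩
        simp [pvStepA, hany, List.filter_append, hp]
      | false =>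
        -- no ancestor of p is in s: the `any` is false and the inner filter removes nothing
        have hnone : ∀ e ∈ xs.filter (fun q => ! pvHasAnc s q), pvAnc p e = false := by
          intro e he
          have hes : e ∈ s := (hmem e).mpr (List.mem_append_left _ (List.mem_filter.mp he).1)
          cases h : pvAnc p e with
          | false => rfl
          | true => exact absurd ((pvHasAnc_iff s p).mpr ⟨e, hes, h⟩) (by simp [hp])
        have hany : (xs.filter (fun q => ! pvHasAnc s q)).any (fun e => pvAnc p e) = false := by
          simp only [List.any_eq_false]
          intro e he; simp [hnone e he]
        have hfil : (xs.filter (fun q => ! pvHasAnc s q)).filter (fun q => ! pvAnc p q) =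
            xs.filter (fun q => ! pvHasAnc s q) := by
          apply List.filter_eq_self.mpr
          intro e he; simp [hnone e he]
        simp [pvStepA, hany, hfil, List.filter_append, hp]
    rw [List.foldl_cons, hstep, ih (xs ++ [p]) hpw' hmem',
        List.append_assoc, List.singleton_append]

theorem combine_source_paths_py_eq (basic_paths context_paths : List String) :
    combine_source_paths_py basic_paths context_paths =
      combine_source_paths_py_alt basic_paths context_paths := by
  unfold combine_source_paths_py combine_source_paths_py_alt
  dsimp only
  set s := PySem.Set.ofList (basic_paths ++ context_paths) with hs
  set L := PySem.List.sorted s (fun x => x) false with hL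
  have hpw : L.Pairwise (· < ·) := PySem.List.sorted_ofList_pairwise_lt _
  have hmem : ∀ a, a ∈ s ↔ a ∈ L := fun a => (PySem.List.mem_sorted _ _ _ a).symm
  have hA : L.foldl pvStepA [] = L.filter (fun q => ! pvHasAnc s q) := by
    simpa using pv_loop s L [] (by simpa using hpw) (by simpa using hmem)
  have hB : L.foldl (fun result p => if ! pvHasAnc s p then result ++ [p] else result) [] =
      L.filter (fun q => ! pvHasAnc s q) := by
    simpa using PySem.List.foldl_append_if_eq_filter (fun q => ! pvHasAnc s q) (l := L) (acc := [])
  rw [hA, hB]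
  apply PySem.List.sorted_eq_self_of_pairwise
  exact (hpw.sublist List.filter_sublist).imp le_of_lt

-- ===== VERDICT (by name: the statement is the Claim_ definition above) =====
theorem combine_source_paths_py_spec : Claim_equal_combine_source_paths_py := by
  intro basic_paths context_paths _
  exact combine_source_paths_py_eq basic_paths context_paths
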